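-- pv_equiv track=rewrite | github.com/nusret35/llm_dev | pipeline/summarization_pipeline/article_parser.py | is_section
-- ===== SOURCE A (Python) =====
-- def is_section(section_key) :
--     counter = 0
--     for character in section_key :
--         if character == '.' :
--             counter += 1
--         elif counter == 1 and character.isnumeric() :
--             return False
--         """
--         elif counter == 1 and character.isalpha() :
--             model_response = is_section_model_response(section_key)
--             return model_response
--         """
--     return True
-- ===== SOURCE B (Python) =====
-- def is_section(section_key):
--     _head, sep, rest = section_key.partition('.')
--     if not sep:
--         return True
--     mid = rest.partition('.')[0]
--     return not any(c.isnumeric() for c in mid)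
-- ===== Notes on version B (the rewrite author's own statement) =====
-- stated objective: idiomatic
-- what changed: Replaces the dot-counting state-machine scan over every character with str.partition: isolate the segment between the first and second dot and test it directly for numeric characters.
import Mathlib
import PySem

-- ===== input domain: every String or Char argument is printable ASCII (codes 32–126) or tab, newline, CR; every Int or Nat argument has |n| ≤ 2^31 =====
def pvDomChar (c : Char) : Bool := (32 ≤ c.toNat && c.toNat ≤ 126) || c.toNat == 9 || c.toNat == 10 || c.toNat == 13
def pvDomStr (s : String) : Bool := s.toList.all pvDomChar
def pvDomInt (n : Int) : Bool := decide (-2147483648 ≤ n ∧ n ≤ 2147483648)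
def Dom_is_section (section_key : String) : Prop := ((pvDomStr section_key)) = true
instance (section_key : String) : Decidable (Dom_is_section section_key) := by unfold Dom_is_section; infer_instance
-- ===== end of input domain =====

-- B replaces A's dot-counting state machine with str.partition around the first two dots (idiomatic; same cost).


-- ===== PORT A =====
-- 'for character in section_key' with the mutable counter and early return False;
-- character.isnumeric() is PySem.Chars.isdigit (exact on the ASCII domain).
def isSectionLoopA : List Char → Nat → Bool
  | [], _ => true
  | c :: rest, counter =>
    if c = '.' then isSectionLoopA rest (counter + 1)
    else if counter = 1 && PySem.Chars.isdigit c then false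
    else isSectionLoopA rest counter

def is_section (section_key : String) : Bool :=
  isSectionLoopA section_key.toList 0

-- ===== PORT B =====
-- Source B: head, sep, rest = section_key.partition('.'); partition with the one-char
-- separator '.' is ported by hand as takeWhile/dropWhile (exact: head = chars before
-- the first '.', sep empty iff no '.' occurs, rest = chars after it);
-- c.isnumeric() is PySem.Chars.isdigit (exact on the ASCII domain).
def is_section_alt (section_key : String) : Bool :=
  let cs := section_key.toList
  match cs.dropWhile (· ≠ '.') with
  | [] => true            -- sep == '' : no dot
  | _ :: rest =>          -- rest = text after the first dot
    let mid := rest.takeWhile (· ≠ '.')   -- rest.partition('.')[0]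
    ! mid.any PySem.Chars.isdigit

-- ===== PRECONDITION & SPEC =====
def Spec_is_section (section_key : String) (out : Bool) : Prop := out = is_section_alt section_key
instance (section_key : String) (out : Bool) : Decidable (Spec_is_section section_key out) := by unfold Spec_is_section; infer_instance

-- ===== CLAIM (what is proved, stated in full; the proofs are below) =====
def Claim_equal_is_section : Prop := ∀ (section_key : String), Dom_is_section section_key → Spec_is_section section_key (is_section section_key)

-- ===== LEMMAS AND PROOFS =====

-- once counter ≥ 2 the loop can never return False again
lemma isSectionLoopA_ge_two (cs : List Char) : ∀ k, 2 ≤ k → isSectionLoopA cs k = true := by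
  induction cs with
  | nil => intro k _; rfl
  | cons c rest ih =>
    intro k hk
    simp only [isSectionLoopA]
    split_ifs with h1 h2
    · exact ih (k + 1) (by omega)
    · simp at h2; omega
    · exact ih k hk

-- at counter = 1 the loop answers: no digit before the next dot
lemma isSectionLoopA_one (cs : List Char) :
    isSectionLoopA cs 1 = ! (cs.takeWhile (· ≠ '.')).any PySem.Chars.isdigit := by
  induction cs with
  | nil => rfl
  | cons c rest ih =>
    simp only [isSectionLoopA]
    by_cases hc : c = '.'
    · subst hc
      simp [List.takeWhile, isSectionLoopA_ge_two rest 2 (by omega)]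
    · by_cases hd : PySem.Chars.isdigit c
      · simp [List.takeWhile, hc, hd]
      · simp [List.takeWhile, hc, hd, ih]

-- at counter = 0 the loop skips everything before the first dot
lemma isSectionLoopA_zero (cs : List Char) :
    isSectionLoopA cs 0 =
      match cs.dropWhile (· ≠ '.') with
      | [] => true
      | _ :: rest => isSectionLoopA rest 1 := by
  induction cs with
  | nil => rfl
  | cons c rest ih =>
    by_cases hc : c = '.'
    · subst hc; simp [isSectionLoopA, List.dropWhile]
    · simp only [isSectionLoopA, List.dropWhile, hc]
      simpa [hc] using ih

-- ===== VERDICT (by name: the statement is the Claim_ definition above) =====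
theorem is_section_spec : Claim_equal_is_section := by
  intro s _
  show isSectionLoopA s.toList 0 =
    (match s.toList.dropWhile (· ≠ '.') with
     | [] => true
     | _ :: rest => ! (rest.takeWhile (· ≠ '.')).any PySem.Chars.isdigit)
  rw [isSectionLoopA_zero]
  cases s.toList.dropWhile (· ≠ '.') with
  | nil => rfl
  | cons c rest => exact isSectionLoopA_one rest
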